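-- pv_equiv track=rewrite | github.com/ByteMaster-Y/Baekjoon_hub | 프로그래머스/0/181860. 빈 배열에 추가， 삭제하기/빈 배열에 추가， 삭제하기.py | solution
-- ===== SOURCE A (Python) =====
-- def solution(arr, flag):
--     X = []  # 빈 배열 X
--
--     for i in range(len(arr)):
--         if flag[i]:  # flag[i]가 True일 경우
--             X.extend([arr[i]] * (arr[i] * 2))  # arr[i]를 arr[i] * 2번 추가
--         else:  # flag[i]가 False일 경우
--             # X에서 마지막 arr[i]개의 원소 제거
--             X = X[:-arr[i]] if arr[i] <= len(X) else []  # 안전하게 제거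
--
--     return X
-- ===== SOURCE B (Python) =====
-- def solution(arr, flag):
--     # Run-length stack: one (value, count) block per append step,
--     # removals pop/shrink blocks from the top; flatten once at the end.
--     blocks = []
--     for a, f in zip(arr, flag):
--         if f:
--             blocks.append((a, 2 * a))
--         else:
--             k = a
--             while k > 0 and blocks:
--                 v, c = blocks[-1]
--                 if c <= k:
--                     blocks.pop()
--                     k -= c
--                 else:
--                     blocks[-1] = (v, c - k)
--                     k = 0
--     return [v for v, c in blocks for _ in range(c)]
-- ===== Notes on version B (the rewrite author's own statement) =====
-- stated objective: alternative
-- what changed: B keeps the array as a stack of (value, count) run-length blocks, pushing one block per True flag and popping/shrinking top blocks per False flag, flattening once at the end, instead of A's flat list rebuilt by extend and a full-copy slice each step; Pre_ restricts to positive arr elements (the problem's natural domain of counts: for non-positive arr[i] A's slice X[:-arr[i]] denotes a prefix rather than a removal, which B does not reproduce) and excludes flag shorter than arr, where A raises IndexError.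
-- outside the precondition, e.g. on solution([2, 0], [True, False]): A returns [], B returns [2, 2, 2, 2]; on solution([2, -1], [True, False]): A returns [2], B returns [2, 2, 2, 2]
import Mathlib
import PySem

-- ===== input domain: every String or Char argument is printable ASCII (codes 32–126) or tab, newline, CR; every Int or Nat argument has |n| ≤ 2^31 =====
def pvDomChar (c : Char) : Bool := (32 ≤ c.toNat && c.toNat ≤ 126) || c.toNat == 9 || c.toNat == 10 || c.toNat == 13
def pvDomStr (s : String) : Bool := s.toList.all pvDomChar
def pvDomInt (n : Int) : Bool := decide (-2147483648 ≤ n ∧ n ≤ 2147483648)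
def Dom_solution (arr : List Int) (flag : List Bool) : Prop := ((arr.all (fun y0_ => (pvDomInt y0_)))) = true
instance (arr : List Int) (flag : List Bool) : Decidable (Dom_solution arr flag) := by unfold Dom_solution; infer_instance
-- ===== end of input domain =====

-- B replaces A's flat list (extend / full-copy slicing per step) by a stack of (value, count)
-- run-length blocks flattened once at the end.

-- ===== PORT A =====
-- loop 'for i in range(len(arr))' reading arr[i], flag[i]: parallel recursion over both
-- lists with accumulator X; the '_ :: _, []' case is where Python raises IndexError
-- (excluded by Pre_solution).
def solutionLoopA : List Int → List Bool → List Int → List Int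
  | [], _, X => X
  | _ :: _, [], X => X
  | a :: ar, f :: fl, X =>
      if f then
        solutionLoopA ar fl (X ++ List.replicate (a * 2).toNat a)
      else
        solutionLoopA ar fl (if a ≤ (X.length : Int) then PySem.List.slice X none (some (-a)) else [])

def solution (arr : List Int) (flag : List Bool) : List Int :=
  solutionLoopA arr flag []

-- ===== PORT B =====
-- the 'while k > 0 and blocks' loop (stack top = head of the list)
def popBlocks (k : Int) : List (Int × Int) → List (Int × Int)
  | [] => []
  | (v, c) :: rest =>
      if 0 < k then
        if c ≤ k then popBlocks (k - c) rest
        else (v, c - k) :: rest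
      else (v, c) :: rest

-- the 'for a, f in zip(arr, flag)' loop over the block stack
def solutionLoopB : List Int → List Bool → List (Int × Int) → List (Int × Int)
  | [], _, blocks => blocks
  | _ :: _, [], blocks => blocks
  | a :: ar, f :: fl, blocks =>
      if f then solutionLoopB ar fl ((a, 2 * a) :: blocks)
      else solutionLoopB ar fl (popBlocks a blocks)

-- final comprehension '[v for v, c in blocks for _ in range(c)]' (stack top is the head,
-- so flatten the reverse)
def flattenBlocks (blocks : List (Int × Int)) : List Int :=
  blocks.reverse.flatMap (fun p => List.replicate p.2.toNat p.1)

def solution_alt (arr : List Int) (flag : List Bool) : List Int :=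
  flattenBlocks (solutionLoopB arr flag [] )

-- ===== PRECONDITION & SPEC =====
-- Pre_ restricts to the problem's natural domain of positive element counts: for non-positive
-- arr[i] a False step's slice X[:-arr[i]] denotes a prefix (empty for arr[i] = 0, the first
-- -arr[i] elements for arr[i] < 0) rather than a removal of arr[i] elements, a corner outside
-- the task's meaning that B's stack removal does not reproduce; Pre_ also excludes flag
-- shorter than arr, where A raises IndexError.
def Pre_solution (arr : List Int) (flag : List Bool) : Prop :=
  arr.length ≤ flag.length ∧ ∀ a ∈ arr, 0 < a
instance (arr : List Int) (flag : List Bool) : Decidable (Pre_solution arr flag) := by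
  unfold Pre_solution; infer_instance

def pvWitness_solution : List Int × List Bool := ([3, 2, 1], [true, false, false])

def Spec_solution (arr : List Int) (flag : List Bool) (out : List Int) : Prop :=
  out = solution_alt arr flag
instance (arr : List Int) (flag : List Bool) (out : List Int) : Decidable (Spec_solution arr flag out) := by
  unfold Spec_solution; infer_instance

-- ===== CLAIM =====
def Claim_equal_solution : Prop := ∀ (arr : List Int) (flag : List Bool), Dom_solution arr flag → Pre_solution arr flag → Spec_solution arr flag (solution arr flag)

-- ===== LEMMAS AND PROOFS =====

theorem flattenBlocks_cons (v c : Int) (blocks : List (Int × Int)) :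
    flattenBlocks ((v, c) :: blocks) = flattenBlocks blocks ++ List.replicate c.toNat v := by
  simp [flattenBlocks]

-- popping k elements off the block stack is List.take on the flattened list
theorem flattenBlocks_pop (k : Int) (blocks : List (Int × Int))
    (hpos : ∀ p ∈ blocks, 0 < p.2) :
    flattenBlocks (popBlocks k blocks) =
      (flattenBlocks blocks).take ((flattenBlocks blocks).length - k.toNat) ∧
      (∀ p ∈ popBlocks k blocks, 0 < p.2) := by
  induction blocks generalizing k with
  | nil => simp [popBlocks, flattenBlocks]
  | cons hd tl ih =>
      obtain ⟨v, c⟩ := hd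
      have hc : 0 < c := hpos (v, c) (by simp)
      have htl : ∀ p ∈ tl, 0 < p.2 := fun p hp => hpos p (List.mem_cons_of_mem _ hp)
      rw [popBlocks]
      by_cases hk : 0 < k
      · simp only [if_pos hk]
        by_cases hck : c ≤ k
        · simp only [if_pos hck]
          obtain ⟨heq, hpos'⟩ := ih (k - c) htl
          refine ⟨?_, hpos'⟩
          rw [heq, flattenBlocks_cons]
          rw [List.take_append_of_le_length]
          · congr 1
            have : (k - c).toNat = k.toNat - c.toNat := by omega
            simp [this]
            omega
          · simp
            omega
        · simp only [if_neg hck]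
          refine ⟨?_, ?_⟩
          · rw [flattenBlocks_cons, flattenBlocks_cons, List.take_append]
            congr 1
            · rw [List.take_of_length_le]
              simp
              omega
            · rw [List.take_replicate]
              congr 1
              simp
              omega
          · intro p hp
            rcases List.mem_cons.mp hp with hp | hp
            · rw [hp]; simp; omega
            · exact htl p hp
      · simp only [if_neg hk]
        refine ⟨?_, hpos⟩
        rw [List.take_of_length_le]
        omega

-- A's removal branch, for 0 < a, keeps the first len X - a elements (clamped at 0)
theorem sliceA_eq_take (X : List Int) (a : Int) (ha : 0 < a) :
    (if a ≤ (X.length : Int) then PySem.List.slice X none (some (-a)) else []) =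
      X.take (X.length - a.toNat) := by
  by_cases h1 : a ≤ (X.length : Int)
  · rw [if_pos h1]
    have haeq : a = ((a.toNat : Nat) : Int) := by omega
    rw [haeq]
    exact PySem.List.slice_to_neg_natCast X a.toNat (by omega)
  · rw [if_neg h1]
    have : X.length - a.toNat = 0 := by omega
    rw [this, List.take_zero]

-- main loop invariant: A's X is the flattening of B's block stack
theorem loop_eq (ar : List Int) (fl : List Bool) (X : List Int) (blocks : List (Int × Int))
    (hlen : ar.length ≤ fl.length)
    (hall : ∀ a ∈ ar, 0 < a)
    (hX : flattenBlocks blocks = X)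
    (hpos : ∀ p ∈ blocks, 0 < p.2) :
    solutionLoopA ar fl X = flattenBlocks (solutionLoopB ar fl blocks) := by
  induction ar generalizing fl X blocks with
  | nil => simpa [solutionLoopA, solutionLoopB] using hX.symm
  | cons a art ih =>
      cases fl with
      | nil => simp at hlen
      | cons f flt =>
          subst hX
          have ha : 0 < a := hall a (by simp)
          have hart : ∀ x ∈ art, 0 < x := fun x hx => hall x (List.mem_cons_of_mem _ hx)
          simp only [solutionLoopA, solutionLoopB]
          by_cases hf : f = true
          · subst hf
            simp only [if_true]
            refine ih flt _ _ (by simpa using hlen) hart ?_ ?_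
            · rw [flattenBlocks_cons]
              congr 2
              omega
            · intro p hp
              rcases List.mem_cons.mp hp with hp | hp
              · rw [hp]; simp; omega
              · exact hpos p hp
          · have hf' : f = false := by simpa using hf
            subst hf'
            simp only [Bool.false_eq_true, if_false]
            obtain ⟨heq, hpos'⟩ := flattenBlocks_pop a blocks hpos
            refine ih flt _ _ (by simpa using hlen) hart ?_ hpos'
            rw [heq, sliceA_eq_take _ _ ha]

-- ===== VERDICT =====
theorem solution_spec : Claim_equal_solution := by
  intro arr flag _ hpre
  unfold Spec_solution solution solution_alt
  exact loop_eq arr flag [] [] hpre.1 hpre.2 (by simp [flattenBlocks]) (by simp)
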